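-- pv_equiv track=rewrite | github.com/DeveloperJose/Python-RockManX8 | src/main/python/x8_utils.py | __split_to_sentences__
-- ===== SOURCE A (Python) =====
-- def __split_to_sentences__(raw_bytes):
--     split_indices = [0]
--     split_indices.extend([idx + 1 for idx, char_byte in enumerate(raw_bytes) if char_byte == 65533])
--     split_indices.append(len(raw_bytes) + 1)
--     sentences = []
--     max_sentence_len = 0
--     for split_idx, slice_start in enumerate(split_indices):
--         if split_idx >= len(split_indices) - 1:
--             break
--         slice_end = split_indices[split_idx + 1]
--         sentence = raw_bytes[slice_start:slice_end]
--         max_sentence_len = max(max_sentence_len, len(sentence))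
--         sentences.append(sentence)
--     return sentences, max_sentence_len
-- ===== SOURCE B (Python) =====
-- def __split_to_sentences__(raw_bytes):
--     sentences = []
--     max_sentence_len = 0
--     current = []
--     for char_byte in raw_bytes:
--         current.append(char_byte)
--         if char_byte == 65533:
--             sentences.append(current)
--             if len(current) > max_sentence_len:
--                 max_sentence_len = len(current)
--             current = []
--     sentences.append(current)
--     if len(current) > max_sentence_len:
--         max_sentence_len = len(current)
--     return sentences, max_sentence_len
-- ===== Notes on version B (the rewrite author's own statement) =====
-- stated objective: simpler
-- what changed: B replaces A's precomputed split-index table plus index/slice loop with a single pass that accumulates the current segment element by element and flushes it at each 65533 delimiter (and once at the end), tracking the running maximum length.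
import Mathlib
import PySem

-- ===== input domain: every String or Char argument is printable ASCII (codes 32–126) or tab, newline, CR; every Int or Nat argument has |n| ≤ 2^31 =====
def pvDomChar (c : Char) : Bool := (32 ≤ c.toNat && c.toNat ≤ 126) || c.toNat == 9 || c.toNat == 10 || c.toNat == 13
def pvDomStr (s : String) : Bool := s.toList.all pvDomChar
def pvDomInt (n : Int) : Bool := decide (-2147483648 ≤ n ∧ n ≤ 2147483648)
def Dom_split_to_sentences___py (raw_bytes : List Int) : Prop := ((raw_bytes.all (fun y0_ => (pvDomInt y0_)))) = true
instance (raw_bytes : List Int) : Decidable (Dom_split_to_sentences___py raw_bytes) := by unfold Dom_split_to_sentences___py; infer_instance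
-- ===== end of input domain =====

-- B replaces A's split-index table + slicing loop by a single element-accumulating pass (simpler decomposition, same return value).

-- ===== PORT A =====
-- the 'for split_idx, slice_start in enumerate(split_indices)' loop with its 'break' at the
-- last index: it processes consecutive index pairs while at least two indices remain
def aLoop (raw : List Int) : List Int → List (List Int) → Int → List (List Int) × Int
  | s :: e :: rest, sentences, m =>
      let sentence := PySem.List.slice raw (some s) (some e)
      aLoop raw (e :: rest) (sentences ++ [sentence]) (max m (sentence.length : Int))
  | _, sentences, m => (sentences, m)

def split_to_sentences___py (raw_bytes : List Int) : List (List Int) × Int :=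
  let split_indices : List Int :=
    [0]
      ++ (PySem.List.enumerate raw_bytes).filterMap
          (fun p => if p.2 == 65533 then some (p.1 + 1) else none)
      ++ [(raw_bytes.length : Int) + 1]
  aLoop raw_bytes split_indices [] 0

-- ===== PORT B =====
def bLoop : List Int → List (List Int) → Int → List Int → List (List Int) × Int
  | current, sentences, m, [] =>
      (sentences ++ [current],
       if (current.length : Int) > m then (current.length : Int) else m)
  | current, sentences, m, x :: rest =>
      let current' := current ++ [x]
      if x == 65533 then
        bLoop [] (sentences ++ [current'])
          (if (current'.length : Int) > m then (current'.length : Int) else m) rest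
      else
        bLoop current' sentences m rest

def split_to_sentences___py_alt (raw_bytes : List Int) : List (List Int) × Int :=
  bLoop [] [] 0 raw_bytes

-- ===== PRECONDITION & SPEC =====
def Spec_split_to_sentences___py (raw_bytes : List Int) (out : List (List Int) × Int) : Prop := out = split_to_sentences___py_alt raw_bytes
instance (raw_bytes : List Int) (out : List (List Int) × Int) : Decidable (Spec_split_to_sentences___py raw_bytes out) := by unfold Spec_split_to_sentences___py; infer_instance

-- ===== CLAIM (what is proved, stated in full; the proofs are below) =====
def Claim_equal_split_to_sentences___py : Prop := ∀ (raw_bytes : List Int), Dom_split_to_sentences___py raw_bytes → Spec_split_to_sentences___py raw_bytes (split_to_sentences___py raw_bytes)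

-- ===== LEMMAS AND PROOFS =====

-- canonical split of a byte list at (and keeping) each 65533, always ending in a final (possibly empty) segment
def splitC : List Int → List (List Int)
  | [] => [[]]
  | x :: rest => if x = 65533 then [x] :: splitC rest else (splitC rest).modifyHead (x :: ·)

def segMax (ss : List (List Int)) (m : Int) : Int :=
  ss.foldl (fun a s => max a (s.length : Int)) m

def segsOf (raw : List Int) : List Int → List (List Int)
  | s :: e :: rest => PySem.List.slice raw (some s) (some e) :: segsOf raw (e :: rest)
  | _ => []

def dlist (raw : List Int) : List Int :=
  (PySem.List.enumerate raw).filterMap (fun p => if p.2 == 65533 then some (p.1 + 1) else none)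

theorem segsOf_cons2 (raw : List Int) (s e : Int) (rest : List Int) :
    segsOf raw (s :: e :: rest) =
      PySem.List.slice raw (some s) (some e) :: segsOf raw (e :: rest) := rfl

theorem splitC_ne_nil (raw : List Int) : splitC raw ≠ [] := by
  cases raw with
  | nil => simp [splitC]
  | cons x rest =>
      simp only [splitC]
      split
      · simp
      · cases h : splitC rest with
        | nil => exact absurd h (splitC_ne_nil rest)
        | cons s ss => simp [List.modifyHead]

theorem segMax_cons (s : List Int) (ss : List (List Int)) (m : Int) :
    segMax (s :: ss) m = segMax ss (max m (s.length : Int)) := rfl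

theorem if_gt_eq_max (a m : Int) : (if a > m then a else m) = max m a := by
  split <;> omega

theorem aLoop_eq (raw : List Int) :
    ∀ idxs acc m, aLoop raw idxs acc m = (acc ++ segsOf raw idxs, segMax (segsOf raw idxs) m)
  | [], acc, m => by simp [aLoop, segsOf, segMax]
  | [s], acc, m => by simp [aLoop, segsOf, segMax]
  | s :: e :: rest, acc, m => by
      rw [aLoop, aLoop_eq raw (e :: rest), segsOf_cons2]
      simp [segMax_cons, List.append_assoc]

theorem slice_cons_succ (x : Int) (raw : List Int) (s e : Int) (hs : 0 ≤ s) (he : 0 ≤ e) :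
    PySem.List.slice (x :: raw) (some (s + 1)) (some (e + 1)) =
      PySem.List.slice raw (some s) (some e) := by
  rw [PySem.List.slice_toNat (x :: raw) (by omega) (by omega),
      PySem.List.slice_toNat raw hs he]
  rw [show (s + 1).toNat = s.toNat + 1 by omega,
      show (e + 1).toNat - (s.toNat + 1) = e.toNat - s.toNat by omega,
      List.drop_succ_cons]

theorem slice_zero_succ (x : Int) (raw : List Int) (e : Int) (he : 0 ≤ e) :
    PySem.List.slice (x :: raw) (some 0) (some (e + 1)) =
      x :: PySem.List.slice raw (some 0) (some e) := by
  rw [PySem.List.slice_toNat (x :: raw) (by omega) (by omega),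
      PySem.List.slice_toNat raw (by omega) he]
  have h1 : (e + 1).toNat - (0 : Int).toNat = e.toNat + 1 := by omega
  have h2 : e.toNat - (0 : Int).toNat = e.toNat := by omega
  rw [h1, h2]
  simp

theorem slice_zero_one (x : Int) (raw : List Int) :
    PySem.List.slice (x :: raw) (some 0) (some 1) = [x] := by
  rw [PySem.List.slice_toNat (x :: raw) (by omega) (by omega)]
  rfl

theorem segsOf_shift (x : Int) (raw : List Int) :
    ∀ idxs, (∀ i ∈ idxs, (0:Int) ≤ i) →
      segsOf (x :: raw) (idxs.map (· + 1)) = segsOf raw idxs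
  | [], _ => rfl
  | [s], _ => rfl
  | s :: e :: rest, h => by
      have hs : (0:Int) ≤ s := h s (by simp)
      have he : (0:Int) ≤ e := h e (by simp)
      simp only [List.map_cons, segsOf_cons2]
      rw [slice_cons_succ x raw s e hs he,
          show (e + 1) :: rest.map (· + 1) = (e :: rest).map (· + 1) by simp,
          segsOf_shift x raw (e :: rest) (fun i hi => h i (by simp at hi ⊢; tauto))]

theorem enumerate_shift (xs : List Int) :
    ∀ s : Int, PySem.List.enumerate xs (s + 1) =
      (PySem.List.enumerate xs s).map (fun p => (p.1 + 1, p.2)) := by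
  induction xs with
  | nil => intro s; simp [PySem.List.enumerate_nil]
  | cons x rest ih =>
      intro s
      rw [PySem.List.enumerate_cons, PySem.List.enumerate_cons, List.map_cons]
      rw [show s + 1 + 1 = (s + 1) + 1 by ring, ih (s + 1)]

theorem dlist_cons (x : Int) (rest : List Int) :
    dlist (x :: rest) =
      (if x = 65533 then [1] else []) ++ (dlist rest).map (· + 1) := by
  unfold dlist
  rw [PySem.List.enumerate_cons, List.filterMap_cons, enumerate_shift rest 0,
      List.filterMap_map]
  have hcomp : (fun p : Int × Int => if p.2 == 65533 then some (p.1 + 1) else none) ∘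
           (fun p : Int × Int => (p.1 + 1, p.2)) =
         fun p : Int × Int =>
           ((if p.2 == 65533 then some (p.1 + 1) else none).map (· + 1)) := by
    funext p
    by_cases h : p.2 = 65533 <;> simp [h]
  rw [hcomp, ← List.map_filterMap]
  by_cases h : x = 65533 <;> simp [h]

theorem dlist_nonneg (raw : List Int) : ∀ i ∈ dlist raw, (0:Int) ≤ i := by
  induction raw with
  | nil => simp [dlist, PySem.List.enumerate_nil]
  | cons x rest ih =>
      rw [dlist_cons]
      intro i hi
      simp only [List.mem_append, List.mem_map] at hi
      rcases hi with hi | ⟨j, hj, rfl⟩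
      · split at hi <;> simp_all
      · have := ih j hj; omega

theorem segs_Ilist (raw : List Int) :
    segsOf raw ((0:Int) :: (dlist raw ++ [(raw.length : Int) + 1])) = splitC raw := by
  induction raw with
  | nil =>
      show segsOf [] [0, 1] = splitC []
      rw [segsOf_cons2, PySem.List.slice_toNat [] (by omega) (by omega)]
      rfl
  | cons x rest ih =>
      have hcast : ((x :: rest).length : Int) + 1 = ((rest.length : Int) + 1) + 1 := by
        simp
      have hnn : ∀ i ∈ dlist rest ++ [(rest.length : Int) + 1], (0:Int) ≤ i := by
        intro i hi
        rcases List.mem_append.mp hi with h | h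
        · exact dlist_nonneg rest i h
        · simp at h; omega
      have hnn0 : ∀ i ∈ (0:Int) :: (dlist rest ++ [(rest.length : Int) + 1]), (0:Int) ≤ i := by
        intro i hi
        rcases List.mem_cons.mp hi with rfl | hi
        · omega
        · exact hnn i hi
      rw [dlist_cons, hcast]
      by_cases h : x = 65533
      · -- x is the delimiter: first segment is [x], the rest shifts by one
        have hmap : (1:Int) :: ((dlist rest).map (· + 1) ++ [(rest.length : Int) + 1 + 1]) =
            ((0:Int) :: (dlist rest ++ [(rest.length : Int) + 1])).map (· + 1) := by
          simp
        rw [show ((if x = 65533 then [1] else []) ++ (dlist rest).map (· + 1)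
              ++ [(rest.length : Int) + 1 + 1])
            = (1:Int) :: ((dlist rest).map (· + 1) ++ [(rest.length : Int) + 1 + 1]) by
              simp [h]]
        rw [segsOf_cons2, slice_zero_one, hmap, segsOf_shift x rest _ hnn0, ih]
        simp [splitC, h]
      · -- x is ordinary: it is prepended to the first segment
        rw [show ((if x = 65533 then [1] else []) ++ (dlist rest).map (· + 1)
              ++ [(rest.length : Int) + 1 + 1])
            = (dlist rest ++ [(rest.length : Int) + 1]).map (· + 1) by
              simp [h]]
        rcases ht : dlist rest ++ [(rest.length : Int) + 1] with _ | ⟨e, t'⟩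
        · exact absurd ht (by simp)
        · have he : (0:Int) ≤ e := hnn e (by rw [ht]; simp)
          have htnn : ∀ i ∈ e :: t', (0:Int) ≤ i := by
            intro i hi; exact hnn i (ht ▸ hi)
          rw [List.map_cons, segsOf_cons2, slice_zero_succ x rest e he,
              show (e + 1) :: t'.map (· + 1) = (e :: t').map (· + 1) by simp,
              segsOf_shift x rest (e :: t') htnn]
          have hrest : splitC rest = PySem.List.slice rest (some 0) (some e) :: segsOf rest (e :: t') := by
            rw [← ih, ht, segsOf_cons2]
          simp [splitC, h, hrest, List.modifyHead]

theorem modifyHead_nil_append (ss : List (List Int)) :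
    ss.modifyHead (fun s => [] ++ s) = ss := by
  cases ss <;> simp [List.modifyHead]

theorem bLoop_eq (raw : List Int) :
    ∀ cur sentences m, bLoop cur sentences m raw =
      (sentences ++ (splitC raw).modifyHead (cur ++ ·),
       segMax ((splitC raw).modifyHead (cur ++ ·)) m) := by
  induction raw with
  | nil =>
      intro cur sentences m
      simp [bLoop, splitC, List.modifyHead, segMax, if_gt_eq_max]
  | cons x rest ih =>
      intro cur sentences m
      by_cases h : x = 65533
      · rw [show bLoop cur sentences m (x :: rest) =
            bLoop [] (sentences ++ [cur ++ [x]])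
              (if ((cur ++ [x]).length : Int) > m then ((cur ++ [x]).length : Int) else m) rest by
              simp [bLoop, h]]
        rw [ih, if_gt_eq_max, modifyHead_nil_append]
        simp [splitC, h, List.modifyHead, segMax_cons, List.append_assoc]
      · rw [show bLoop cur sentences m (x :: rest) = bLoop (cur ++ [x]) sentences m rest by
              simp [bLoop, h]]
        rw [ih]
        rcases hs : splitC rest with _ | ⟨s, ss⟩
        · exact absurd hs (splitC_ne_nil rest)
        · simp [splitC, h, hs, List.modifyHead]

-- ===== VERDICT (by name: the statement is the Claim_ definition above) =====
theorem split_to_sentences___py_spec : Claim_equal_split_to_sentences___py := by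
  intro raw_bytes _
  unfold Spec_split_to_sentences___py split_to_sentences___py split_to_sentences___py_alt
  rw [bLoop_eq, modifyHead_nil_append]
  show aLoop raw_bytes ((0:Int) :: (dlist raw_bytes ++ [(raw_bytes.length : Int) + 1])) [] 0 = _
  rw [aLoop_eq, segs_Ilist]
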